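-- pv_equiv track=rewrite | github.com/sriharijayaram5/qudi | hardware/microwaveQ/microwaveq_py/microwaveQ/microwaveQ.py | _writeBits
-- ===== SOURCE A (Python) =====
-- def _writeBits(register, data, bit_start, bit_stop):
--     assert 0 <= bit_start < bit_stop < 32
--     assert data.bit_length() <= bit_stop - bit_start
--     data <<= bit_start
--     mask = sum([1 << i for i in range(bit_start, bit_stop)]) ^ 0xFFFFFFFF
--     register &= mask   # clear bits
--     register |= data   # write bits
--     return register
-- ===== SOURCE B (Python) =====
-- def _writeBits(register, data, bit_start, bit_stop):
--     assert 0 <= bit_start < bit_stop < 32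
--     assert data.bit_length() <= bit_stop - bit_start
--     kept = register & 0xFFFFFFFF
--     kept -= (kept >> bit_start) % (1 << (bit_stop - bit_start)) << bit_start
--     return kept | (data << bit_start)
-- ===== Notes on version B (the rewrite author's own statement) =====
-- stated objective: alternative
-- what changed: B uses no bit mask at all: instead of A's loop-summed complement mask ANDed into the register, B truncates the register to 32 bits, extracts the target field by shift/mod arithmetic and subtracts it out, then ORs the shifted data in.
import Mathlib
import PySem

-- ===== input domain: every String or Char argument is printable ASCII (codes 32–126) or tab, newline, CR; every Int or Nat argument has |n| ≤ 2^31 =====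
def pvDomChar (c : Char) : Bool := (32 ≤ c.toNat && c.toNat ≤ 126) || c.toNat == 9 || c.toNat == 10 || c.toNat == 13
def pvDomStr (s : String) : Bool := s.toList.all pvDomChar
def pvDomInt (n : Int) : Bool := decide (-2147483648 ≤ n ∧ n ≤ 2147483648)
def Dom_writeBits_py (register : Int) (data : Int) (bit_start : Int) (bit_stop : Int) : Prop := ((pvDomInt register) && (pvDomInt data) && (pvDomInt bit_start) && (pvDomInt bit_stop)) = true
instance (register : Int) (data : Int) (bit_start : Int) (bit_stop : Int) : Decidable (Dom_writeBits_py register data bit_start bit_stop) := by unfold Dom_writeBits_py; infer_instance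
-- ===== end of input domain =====

-- B clears the bit field without any mask: it extracts the field's value by shift/mod arithmetic
-- and subtracts it from the 32-bit-truncated register, instead of A's loop-summed complement mask and AND.

-- ===== PORT A =====
-- Literal port of A: mask built by summing 1 << i over range(bit_start, bit_stop), XORed with 0xFFFFFFFF, then AND / OR.
def writeBits_py (register : Int) (data : Int) (bit_start : Int) (bit_stop : Int) : Int :=
  let data := data <<< bit_start.toNat
  let mask : Int := PySem.Int.bxor ((PySem.List.pyRange bit_start bit_stop 1).map (fun i => (1 : Int) <<< i.toNat)).sum 0xFFFFFFFF
  let register := PySem.Int.band register mask   -- clear bits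
  let register := PySem.Int.bor register data    -- write bits
  register

-- ===== PORT B =====
-- Literal port of B: truncate the register to 32 bits, subtract the field extracted by shift/mod, then OR the shifted data in.
def writeBits_py_alt (register : Int) (data : Int) (bit_start : Int) (bit_stop : Int) : Int :=
  let kept := PySem.Int.band register 0xFFFFFFFF
  let kept := kept - (PySem.Int.mod (kept >>> bit_start.toNat) ((1 : Int) <<< (bit_stop - bit_start).toNat)) <<< bit_start.toNat
  PySem.Int.bor kept (data <<< bit_start.toNat)

-- ===== PRECONDITION & SPEC =====
-- Pre_ excludes exactly the inputs on which A's two asserts raise AssertionError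
-- (bit range not 0 ≤ start < stop < 32, or data.bit_length() > stop - start, i.e. |data| ≥ 2^(stop-start)).
def Pre_writeBits_py (register : Int) (data : Int) (bit_start : Int) (bit_stop : Int) : Prop :=
  0 ≤ bit_start ∧ bit_start < bit_stop ∧ bit_stop < 32 ∧ data.natAbs < 2 ^ (bit_stop - bit_start).toNat
instance (register : Int) (data : Int) (bit_start : Int) (bit_stop : Int) : Decidable (Pre_writeBits_py register data bit_start bit_stop) := by unfold Pre_writeBits_py; infer_instance

def pvWitness_writeBits_py : Int × Int × Int × Int := (5, 3, 1, 4)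

def Spec_writeBits_py (register : Int) (data : Int) (bit_start : Int) (bit_stop : Int) (out : Int) : Prop := out = writeBits_py_alt register data bit_start bit_stop
instance (register : Int) (data : Int) (bit_start : Int) (bit_stop : Int) (out : Int) : Decidable (Spec_writeBits_py register data bit_start bit_stop out) := by unfold Spec_writeBits_py; infer_instance

-- ===== CLAIM (what is proved, stated in full; the proofs are below) =====
def Claim_equal_writeBits_py : Prop := ∀ (register : Int) (data : Int) (bit_start : Int) (bit_stop : Int), Dom_writeBits_py register data bit_start bit_stop → Pre_writeBits_py register data bit_start bit_stop → Spec_writeBits_py register data bit_start bit_stop (writeBits_py register data bit_start bit_stop)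

-- ===== LEMMAS AND PROOFS =====

-- Sum of 2^i over [a, b) equals 2^b - 2^a (shifts of 1 by nonnegative indices).
lemma sum_shift_pyRange (n : Nat) : ∀ (a b : Int), 0 ≤ a → a ≤ b → (b - a).toNat = n →
    ((PySem.List.pyRange a b 1).map (fun i => (1 : Int) <<< i.toNat)).sum
      = ((1 : Int) <<< b.toNat) - ((1 : Int) <<< a.toNat) := by
  induction n with
  | zero =>
    intro a b ha hab h
    have hba : b = a := by omega
    subst hba
    rw [PySem.List.pyRange_one_eq_nil le_rfl]
    simp
  | succ n ih =>
    intro a b ha hab h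
    have hlt : a < b := by omega
    rw [PySem.List.pyRange_one_cons hlt]
    simp only [List.map_cons, List.sum_cons]
    rw [ih (a + 1) b (by omega) (by omega) (by omega)]
    have h2 : ∀ (k : Nat), (1 : Int) <<< (k : Int) = 2 ^ k := fun k => by
      rw [Int.shiftLeft_natCast_right, Int.shiftLeft_eq, one_mul]
    simp only [h2, Int.shiftLeft_eq, one_mul]
    have h1 : (a + 1).toNat = a.toNat + 1 := by omega
    rw [h1, pow_succ]
    ring

lemma mask_as_shift (a b : Nat) (hab : a ≤ b) : 2 ^ b - 2 ^ a = (2 ^ (b - a) - 1) <<< a := by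
  rw [Nat.shiftLeft_eq, Nat.sub_mul, ← pow_add, one_mul]
  congr 2
  omega

lemma field_extract (k a b : Nat) (hab : a ≤ b) :
    ((k >>> a) % 2 ^ (b - a)) <<< a = k &&& (2 ^ b - 2 ^ a) := by
  rw [mask_as_shift a b hab]
  apply Nat.eq_of_testBit_eq
  intro i
  simp only [Nat.testBit_shiftLeft, Nat.testBit_mod_two_pow, Nat.testBit_shiftRight,
    Nat.testBit_and, Nat.testBit_two_pow_sub_one]
  by_cases h : a ≤ i
  · simp [h, Nat.add_sub_cancel' h, Bool.and_comm]
  · simp [h]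

lemma sub_and_eq_and_xor (t : Nat) : ∀ x y : Nat, x < 2 ^ t → y < 2 ^ t →
    x - (x &&& y) = x &&& (y ^^^ (2 ^ t - 1)) := by
  induction t with
  | zero =>
    intro x y hx hy
    interval_cases x <;> interval_cases y <;> rfl
  | succ t ih =>
    intro x y hx hy
    have hpow : 2 ^ (t + 1) = 2 * 2 ^ t := by rw [pow_succ]; ring
    have hX : x / 2 < 2 ^ t := by omega
    have hY : y / 2 < 2 ^ t := by omega
    have key := ih (x / 2) (y / 2) hX hY
    have e1 : (x &&& y) / 2 = x / 2 &&& y / 2 := Nat.and_div_two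
    have eM : (2 ^ (t + 1) - 1) / 2 = 2 ^ t - 1 := by omega
    have e2 : (x &&& (y ^^^ (2 ^ (t + 1) - 1))) / 2 = x / 2 &&& (y / 2 ^^^ (2 ^ t - 1)) := by
      rw [Nat.and_div_two, Nat.xor_div_two, eM]
    have p1 : (x &&& y) % 2 = 1 ↔ x % 2 = 1 ∧ y % 2 = 1 := Nat.and_mod_two_eq_one
    have p2 : (x &&& (y ^^^ (2 ^ (t + 1) - 1))) % 2 = 1 ↔
        x % 2 = 1 ∧ (y ^^^ (2 ^ (t + 1) - 1)) % 2 = 1 := Nat.and_mod_two_eq_one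
    have pM : (2 ^ (t + 1) - 1) % 2 = 1 := by omega
    have p3 : (y ^^^ (2 ^ (t + 1) - 1)) % 2 = 1 ↔ ¬(y % 2 = 1 ↔ (2 ^ (t + 1) - 1) % 2 = 1) :=
      Nat.xor_mod_two_eq_one
    have b1 : x / 2 &&& y / 2 ≤ x / 2 := Nat.and_le_left
    have b2 : x / 2 &&& (y / 2 ^^^ (2 ^ t - 1)) ≤ x / 2 := Nat.and_le_left
    have d1 := Nat.div_add_mod (x &&& y) 2
    have d2 := Nat.div_add_mod (x &&& (y ^^^ (2 ^ (t + 1) - 1))) 2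
    have dx := Nat.div_add_mod x 2
    omega

lemma sub_and_eq_and_xor' (t x y : Nat) (hx : x < 2 ^ t) :
    x - (x &&& y) = x &&& ((y % 2 ^ t) ^^^ (2 ^ t - 1)) := by
  have h1 : x &&& y = x &&& (y % 2 ^ t) := by
    have := Nat.and_mod_two_pow (a := x) (b := y) (n := t)
    rw [Nat.mod_eq_of_lt hx] at this
    rw [← this, Nat.mod_eq_of_lt (lt_of_le_of_lt Nat.and_le_left hx)]
  rw [h1, sub_and_eq_and_xor t x (y % 2 ^ t) hx (Nat.mod_lt _ (by positivity))]

lemma cleared_eq (register : Int) (a b : Nat) (hab : a < b) (hb : b < 32) :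
    PySem.Int.band register (((2 ^ b - 2 ^ a : Nat) ^^^ 4294967295 : Nat) : Int) =
      PySem.Int.band register 4294967295 -
        (PySem.Int.mod (PySem.Int.band register 4294967295 >>> a) ((1 : Int) <<< (b - a))) <<< a := by
  have hm32 : (2 ^ b - 2 ^ a : Nat) < 2 ^ 32 := by
    have h1 : (2:Nat) ^ b ≤ 2 ^ 32 := Nat.pow_le_pow_right (by norm_num) (by omega)
    have h2 : 0 < (2:Nat) ^ a := Nat.two_pow_pos a
    omega
  have hf : ((4294967295 : Nat) : Int) = (4294967295 : Int) := by norm_num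
  have hone : ((1 : Int) <<< (b - a)) = (((2 ^ (b - a) : Nat) : Int)) := by
    have := Int.natCast_shiftLeft (2^0) (b - a)
    simp [Nat.shiftLeft_eq, Int.shiftLeft_eq] at this ⊢
  have hXlt : ((2 ^ b - 2 ^ a : Nat) ^^^ 4294967295) < 2 ^ 32 :=
    Nat.xor_lt_two_pow hm32 (by norm_num)
  have h32 : (4294967295 : Nat) = 2 ^ 32 - 1 := by norm_num
  have hfX : (4294967295 : Nat) &&& ((2 ^ b - 2 ^ a) ^^^ 4294967295) = (2 ^ b - 2 ^ a) ^^^ 4294967295 := by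
    nth_rewrite 1 [h32]
    rw [Nat.land_comm]
    exact Nat.and_two_pow_sub_one_of_lt_two_pow hXlt
  -- B's subtraction, for a nonnegative 32-bit value k, is the AND with the complemented mask
  have bsub : ∀ k : Nat, k < 2 ^ 32 →
      ((k : Int)) - (PySem.Int.mod ((k : Int) >>> a) ((1 : Int) <<< (b - a))) <<< a
        = ((k &&& ((2 ^ b - 2 ^ a) ^^^ 4294967295) : Nat) : Int) := by
    intro k hk
    rw [hone, ← Int.natCast_shiftRight, PySem.Int.mod_natCast, ← Int.natCast_shiftLeft,
      field_extract k a b (le_of_lt hab), ← Int.natCast_sub Nat.and_le_left,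
      sub_and_eq_and_xor' 32 k _ hk, Nat.mod_eq_of_lt hm32, ← h32]
  by_cases hr : 0 ≤ register
  · have hreg : register = ((register.toNat : Nat) : Int) := (Int.toNat_of_nonneg hr).symm
    rw [hreg, ← hf, PySem.Int.band_natCast, PySem.Int.band_natCast,
      bsub _ (lt_of_le_of_lt Nat.and_le_right (by norm_num))]
    congr 1
    rw [Nat.land_assoc, hfX]
  · have h0 : ¬ (0 ≤ register) := hr
    have hbandX : ∀ X : Nat, PySem.Int.band register (X : Int) = ((X - (X &&& (-register - 1).toNat) : Nat) : Int) := by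
      intro X
      simp [PySem.Int.band, h0, Int.toNat_natCast]
    rw [← hf, hbandX, hbandX,
      sub_and_eq_and_xor' 32 _ _ hXlt, sub_and_eq_and_xor' 32 _ _ (by norm_num : (4294967295:Nat) < 2 ^ 32),
      bsub _ (lt_of_le_of_lt Nat.and_le_left (by norm_num))]
    congr 1
    rw [Nat.land_comm (4294967295 : Nat), Nat.land_assoc, hfX, Nat.land_comm]

-- ===== VERDICT (by name: the statement is the Claim_ definition above) =====
theorem writeBits_py_spec : Claim_equal_writeBits_py := by
  intro register data bit_start bit_stop _ hpre
  obtain ⟨h0, h1, h2, _⟩ := hpre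
  unfold Spec_writeBits_py writeBits_py writeBits_py_alt
  dsimp only
  rw [sum_shift_pyRange (bit_stop - bit_start).toNat bit_start bit_stop h0 (by omega) rfl]
  have hone : ∀ k : Nat, (1 : Int) <<< k = ((2 ^ k : Nat) : Int) := by
    intro k
    rw [Int.shiftLeft_eq, one_mul]
    push_cast
    ring
  have hab : bit_start.toNat < bit_stop.toNat := by omega
  have hb : bit_stop.toNat < 32 := by omega
  have hwa : (bit_stop - bit_start).toNat = bit_stop.toNat - bit_start.toNat := by omega
  rw [hwa, hone bit_stop.toNat, hone bit_start.toNat,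
    ← Int.natCast_sub (Nat.pow_le_pow_right (by norm_num) (le_of_lt hab)),
    show (0xFFFFFFFF : Int) = ((4294967295 : Nat) : Int) from by norm_num,
    PySem.Int.bxor_natCast]
  have ceq := cleared_eq register bit_start.toNat bit_stop.toNat hab hb
  rw [show (4294967295 : Int) = ((4294967295 : Nat) : Int) from by norm_num] at ceq
  rw [ceq]
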